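-- pv_equiv track=rewrite | github.com/amonapp/amon | amon/apps/plugins/utils.py | sort_header
-- ===== SOURCE A (Python) =====
-- def sort_header(header_list=None):
--     default_score = 0
--     scores = {'ns': 2, 'data': 2, 'table': 1, 'database': 2, 'query': 3, 'op': 1, 'table_name': 1, 'db': 2}
--     all_fields = []
--     for i in header_list:
--         get_score = scores.get(i, default_score)
--         with_scores =  (i, get_score)
--         all_fields.append(with_scores)
--
--     all_fields.sort(key=lambda tup: tup[1], reverse=True)
--
--     try:
--         reorganized_header = [i[0] for i in all_fields]
--     except:
--         reorganized_header = None
--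
--     if reorganized_header:
--         header_list = reorganized_header
--
--     return header_list
-- ===== SOURCE B (Python) =====
-- def sort_header(header_list=None):
--     scores = {'ns': 2, 'data': 2, 'table': 1, 'database': 2, 'query': 3, 'op': 1, 'table_name': 1, 'db': 2}
--     b3, b2, b1, b0 = [], [], [], []
--     for i in header_list:
--         s = scores.get(i, 0)
--         if s == 3:
--             b3.append(i)
--         elif s == 2:
--             b2.append(i)
--         elif s == 1:
--             b1.append(i)
--         else:
--             b0.append(i)
--     return b3 + b2 + b1 + b0
-- ===== Notes on version B (the rewrite author's own statement) =====
-- stated objective: alternative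
-- what changed: Replaced build-pairs-then-stable-sort with a one-pass bucket sort into four lists (scores 3,2,1,0) concatenated in descending score order.
import Mathlib
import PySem

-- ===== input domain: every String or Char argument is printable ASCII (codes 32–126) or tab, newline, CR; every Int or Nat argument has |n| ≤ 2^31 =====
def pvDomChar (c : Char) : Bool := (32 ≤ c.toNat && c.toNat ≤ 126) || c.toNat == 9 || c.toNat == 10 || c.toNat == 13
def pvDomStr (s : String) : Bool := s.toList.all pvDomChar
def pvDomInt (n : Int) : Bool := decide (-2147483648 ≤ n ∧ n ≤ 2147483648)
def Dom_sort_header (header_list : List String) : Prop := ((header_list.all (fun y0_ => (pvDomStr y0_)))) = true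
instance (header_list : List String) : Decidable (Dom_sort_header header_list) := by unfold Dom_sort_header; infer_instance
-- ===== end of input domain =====

-- B replaces A's pair-building + stable descending sort by a single-pass bucket sort
-- over the four possible scores, concatenated in descending score order (objective: alternative).

-- the literal 'scores' dict of the Python source (a shared data table of both programs)
def pvScores : PySem.Dict String Int :=
  PySem.Dict.ofList [("ns", 2), ("data", 2), ("table", 1), ("database", 2),
                     ("query", 3), ("op", 1), ("table_name", 1), ("db", 2)]

-- ===== PORT A =====
-- The try/except around the list comprehension can never fire (iterating a list of pairs
-- raises nothing), so 'reorganized_header = None' is dead code; the final Python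
-- truthiness test 'if reorganized_header:' is nonemptiness of a list.
def sort_header (header_list : List String) : List String :=
  let all_fields := header_list.foldl (fun acc i => acc ++ [(i, pvScores.getD i 0)]) []
  let all_fields := PySem.List.sorted all_fields (fun tup => tup.2) true
  let reorganized_header := all_fields.map (fun i => i.1)
  if reorganized_header ≠ [] then reorganized_header else header_list

-- ===== PORT B =====
-- state b = (b3, b2, b1, b0), one bucket per score, filled in input order
def sort_header_alt (header_list : List String) : List String :=
  let b := header_list.foldl
    (fun (b : List String × List String × List String × List String) i =>
      let s := pvScores.getD i 0
      if s = 3 then (b.1 ++ [i], b.2.1, b.2.2.1, b.2.2.2)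
      else if s = 2 then (b.1, b.2.1 ++ [i], b.2.2.1, b.2.2.2)
      else if s = 1 then (b.1, b.2.1, b.2.2.1 ++ [i], b.2.2.2)
      else (b.1, b.2.1, b.2.2.1, b.2.2.2 ++ [i]))
    ([], [], [], [])
  b.1 ++ b.2.1 ++ b.2.2.1 ++ b.2.2.2

-- ===== PRECONDITION & SPEC =====
def Spec_sort_header (header_list : List String) (out : List String) : Prop := out = sort_header_alt header_list
instance (header_list : List String) (out : List String) : Decidable (Spec_sort_header header_list out) := by unfold Spec_sort_header; infer_instance

-- ===== CLAIM (what is proved, stated in full; the proofs are below) =====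
def Claim_equal_sort_header : Prop := ∀ (header_list : List String), Dom_sort_header header_list → Spec_sort_header header_list (sort_header header_list)

-- ===== LEMMAS AND PROOFS =====

-- every score the dict can yield (looked-up value or the default) is 0, 1, 2 or 3
theorem score_cases (i : String) :
    pvScores.getD i 0 = 0 ∨ pvScores.getD i 0 = 1 ∨ pvScores.getD i 0 = 2 ∨ pvScores.getD i 0 = 3 := by
  have h : pvScores = PySem.Dict.mk [("ns", 2), ("data", 2), ("table", 1), ("database", 2),
                     ("query", 3), ("op", 1), ("table_name", 1), ("db", 2)] := by decide
  rw [h]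
  simp [PySem.Dict.getD, PySem.Dict.get?, List.find?]
  repeat' split
  all_goals simp

theorem insertBy_cons {α : Type} (before : α → α → Bool) (x z : α) (zs : List α) :
    PySem.List.insertBy before x (z :: zs) =
      if before x z then x :: z :: zs else z :: PySem.List.insertBy before x zs := rfl

-- insertion walks past a prefix none of whose elements satisfy 'before x ·'
theorem insertBy_skip {α : Type} (before : α → α → Bool) (x : α) (hi lo : List α)
    (h : ∀ y ∈ hi, before x y = false) :
    PySem.List.insertBy before x (hi ++ lo) = hi ++ PySem.List.insertBy before x lo := by
  induction hi with
  | nil => rfl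
  | cons z zs ih =>
      rw [List.cons_append, insertBy_cons, h z (by simp), List.cons_append,
        ih (fun y hy => h y (by simp [hy]))]
      simp

-- insertion lands at the front of a block whose every element satisfies 'before x ·'
theorem insertBy_front {α : Type} (before : α → α → Bool) (x : α) (lo : List α)
    (h : ∀ y ∈ lo, before x y = true) :
    PySem.List.insertBy before x lo = x :: lo := by
  cases lo with
  | nil => rfl
  | cons z zs => rw [insertBy_cons, h z (by simp)]; simp

-- A-side bucket: the score-k pairs, in input order
def bucket (k : Int) (xs : List (String × Int)) : List (String × Int) :=
  xs.filter (fun p => p.2 == k)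

theorem mem_bucket {k : Int} {xs : List (String × Int)} {y : String × Int}
    (h : y ∈ bucket k xs) : y.2 = k := by
  have := List.of_mem_filter h
  simpa using this

-- characterisation of A's stable descending sort on scores from {0,1,2,3}
theorem sorted_buckets (xs : List (String × Int)) :
    (∀ p ∈ xs, p.2 = 0 ∨ p.2 = 1 ∨ p.2 = 2 ∨ p.2 = 3) →
    PySem.List.sorted xs (fun t => t.2) true =
      bucket 3 xs ++ bucket 2 xs ++ bucket 1 xs ++ bucket 0 xs := by
  rw [PySem.List.sorted_rev_eq_foldl_insertBy]
  induction xs using List.reverseRecOn with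
  | nil => intro _; rfl
  | append_singleton ys x ih =>
      intro h
      rw [List.foldl_append, List.foldl_cons, List.foldl_nil,
        ih (fun p hp => h p (by simp [hp]))]
      rw [show bucket 3 ys ++ bucket 2 ys ++ bucket 1 ys ++ bucket 0 ys =
            bucket 3 ys ++ (bucket 2 ys ++ (bucket 1 ys ++ bucket 0 ys)) from by
          simp [List.append_assoc]]
      rcases h x (by simp) with h0 | h1 | h2 | h3
      · -- score 0: walk past every bucket and land at the very end
        rw [insertBy_skip _ x (bucket 3 ys) _
              (fun y hy => by simp [mem_bucket hy, h0]),
            insertBy_skip _ x (bucket 2 ys) _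
              (fun y hy => by simp [mem_bucket hy, h0]),
            insertBy_skip _ x (bucket 1 ys) _
              (fun y hy => by simp [mem_bucket hy, h0]),
            show PySem.List.insertBy (fun a b => decide (b.2 < a.2)) x (bucket 0 ys) = bucket 0 ys ++ [x] from
              PySem.List.insertBy_of_forall_not_before _ _ _
                (fun y hy => by simp [mem_bucket hy, h0])]
        simp [bucket, List.filter_append, List.filter, h0]
      · rw [insertBy_skip _ x (bucket 3 ys) _
              (fun y hy => by simp [mem_bucket hy, h1]),
            insertBy_skip _ x (bucket 2 ys) _
              (fun y hy => by simp [mem_bucket hy, h1]),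
            insertBy_skip _ x (bucket 1 ys) _
              (fun y hy => by simp [mem_bucket hy, h1]),
            insertBy_front _ x (bucket 0 ys)
              (fun y hy => by simp [mem_bucket hy, h1])]
        simp [bucket, List.filter_append, List.filter, h1]
      · rw [insertBy_skip _ x (bucket 3 ys) _
              (fun y hy => by simp [mem_bucket hy, h2]),
            insertBy_skip _ x (bucket 2 ys) _
              (fun y hy => by simp [mem_bucket hy, h2]),
            insertBy_front _ x (bucket 1 ys ++ bucket 0 ys)
              (fun y hy => by
                rcases List.mem_append.mp hy with hy | hy <;>
                  simp [mem_bucket hy, h2])]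
        simp [bucket, List.filter_append, List.filter, h2]
      · rw [insertBy_skip _ x (bucket 3 ys) _
              (fun y hy => by simp [mem_bucket hy, h3]),
            insertBy_front _ x (bucket 2 ys ++ (bucket 1 ys ++ bucket 0 ys))
              (fun y hy => by
                rcases List.mem_append.mp hy with hy | hy
                · simp [mem_bucket hy, h3]
                · rcases List.mem_append.mp hy with hy | hy <;>
                    simp [mem_bucket hy, h3])]
        simp [bucket, List.filter_append, List.filter, h3]

-- B-side bucket: the score-k header names, in input order
def sbucket (k : Int) (hl : List String) : List String :=
  hl.filter (fun i => pvScores.getD i 0 == k)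

-- invariant of B's single pass: the four bucket lists are the four score filters
theorem alt_buckets (hl : List String) :
    hl.foldl
      (fun (b : List String × List String × List String × List String) i =>
        let s := pvScores.getD i 0
        if s = 3 then (b.1 ++ [i], b.2.1, b.2.2.1, b.2.2.2)
        else if s = 2 then (b.1, b.2.1 ++ [i], b.2.2.1, b.2.2.2)
        else if s = 1 then (b.1, b.2.1, b.2.2.1 ++ [i], b.2.2.2)
        else (b.1, b.2.1, b.2.2.1, b.2.2.2 ++ [i]))
      ([], [], [], [])
    = (sbucket 3 hl, sbucket 2 hl, sbucket 1 hl, sbucket 0 hl) := by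
  induction hl using List.reverseRecOn with
  | nil => rfl
  | append_singleton ys x ih =>
      rw [List.foldl_append, List.foldl_cons, List.foldl_nil, ih]
      rcases score_cases x with h | h | h | h <;>
        simp [sbucket, List.filter_append, List.filter, h]

theorem map_fst_bucket (k : Int) (hl : List String) :
    (bucket k (hl.map (fun i => (i, pvScores.getD i 0)))).map (fun p => p.1) = sbucket k hl := by
  simp [bucket, sbucket, List.filter_map, List.map_map, Function.comp_def]

theorem main_eq (hl : List String) : sort_header hl = sort_header_alt hl := by
  unfold sort_header sort_header_alt
  rw [alt_buckets]
  simp only [PySem.List.foldl_append_singleton_eq_map, List.nil_append]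
  rw [sorted_buckets _ (by
    intro p hp
    rcases List.mem_map.mp hp with ⟨i, _, rfl⟩
    exact score_cases i)]
  cases hl with
  | nil => rfl
  | cons a t =>
      rw [if_pos]
      · simp only [List.map_append, map_fst_bucket]
      · simp only [List.map_append, map_fst_bucket]
        intro hcontra
        rcases score_cases a with h | h | h | h <;>
          simp [sbucket, h] at hcontra

-- ===== VERDICT (by name: the statement is the Claim_ definition above) =====
theorem sort_header_spec : Claim_equal_sort_header := by
  intro header_list _
  unfold Spec_sort_header
  exact main_eq header_list
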